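-- pv_equiv track=rewrite | github.com/mozilla/openwpm-utils | openwpm_utils/analysis.py | get_script_urls_from_call_stack_as_list
-- ===== SOURCE A (Python) =====
-- def get_script_urls_from_call_stack_as_list(call_stack):
--     """Return the urls of the scripts involved in the call stack as a list."""
--     script_urls = []
--     if not call_stack:
--         return script_urls
--     stack_frames = call_stack.strip().split("\n")
--     last_script_url = ""
--     for stack_frame in stack_frames:
--         script_url = stack_frame.rsplit(":", 2)[0].\
--             split("@")[-1].split(" line")[0]
--
--         if script_url != last_script_url:
--             script_urls.append(script_url)
--             last_script_url = script_url
--     return script_urls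
-- ===== SOURCE B (Python) =====
-- def get_script_urls_from_call_stack_as_list(call_stack):
--     """Return the urls of the scripts involved in the call stack as a list."""
--     if not call_stack:
--         return []
--     urls = [frame.rsplit(":", 2)[0].split("@")[-1].split(" line")[0]
--             for frame in call_stack.strip().split("\n")]
--     return _emit_runs(urls, "")
--
--
-- def _emit_runs(urls, skip):
--     # drop the leading run equal to `skip`, then emit the new head and recurse
--     while urls and urls[0] == skip:
--         urls = urls[1:]
--     if not urls:
--         return []
--     return [urls[0]] + _emit_runs(urls[1:], urls[0])
-- ===== Notes on version B (the rewrite author's own statement) =====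
-- stated objective: alternative
-- what changed: A's single iterative loop carrying a mutable last_script_url and conditional append is replaced by a staged pipeline: a comprehension parsing every frame to its URL, then a recursive run-skipping pass that drops each leading run of equal URLs and emits the run's head, building the result by concatenation.
import Mathlib
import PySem

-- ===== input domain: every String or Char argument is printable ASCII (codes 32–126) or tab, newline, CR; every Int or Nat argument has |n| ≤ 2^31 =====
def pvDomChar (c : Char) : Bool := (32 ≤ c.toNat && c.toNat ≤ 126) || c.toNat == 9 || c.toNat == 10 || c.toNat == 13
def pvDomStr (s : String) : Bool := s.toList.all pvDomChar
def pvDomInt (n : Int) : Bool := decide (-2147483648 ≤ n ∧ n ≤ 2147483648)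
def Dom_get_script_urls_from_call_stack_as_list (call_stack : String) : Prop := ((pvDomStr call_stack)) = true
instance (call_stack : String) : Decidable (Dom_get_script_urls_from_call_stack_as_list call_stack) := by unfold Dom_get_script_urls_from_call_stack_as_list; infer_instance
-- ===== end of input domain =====

-- B replaces A's single iterative loop (mutable last_script_url + conditional append) with a staged
-- pipeline: a map parsing every frame to its URL, then a recursive run-skipping pass that drops each
-- leading run of equal URLs and emits the run's head (objective: alternative; not claimed faster).

-- ===== PORT A =====
-- shared frame parser: frame.rsplit(":", 2)[0].split("@")[-1].split(" line")[0]
-- rsplit(":", 2)[0] is hand-ported (PySem has no rsplit): it equals ":".join of all ":"-parts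
-- except the last min(2, n-1) of them — exact for every string.
def pvFrameUrl (frame : List Char) : List Char :=
  let parts := PySem.Chars.splitOn frame [':']
  let head := PySem.Chars.join [':'] (parts.take (parts.length - min 2 (parts.length - 1)))
  let atLast := (PySem.Chars.splitOn head ['@']).getLastD []      -- .split("@")[-1]
  ((PySem.Chars.splitOn atLast (" line".toList)).headD [])        -- .split(" line")[0]

-- loop body of A: st = (last_script_url, script_urls)
def pvStepA (st : List Char × List String) (stack_frame : List Char) : List Char × List String :=
  let script_url := pvFrameUrl stack_frame
  if script_url ≠ st.1 then (script_url, st.2 ++ [String.mk script_url]) else st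

def get_script_urls_from_call_stack_as_list (call_stack : String) : List String :=
  if call_stack.toList = [] then []                               -- if not call_stack: return []
  else
    let stack_frames := PySem.Chars.splitOn (PySem.Chars.strip call_stack.toList) ['\n']
    (stack_frames.foldl pvStepA (([] : List Char), ([] : List String))).2

-- ===== PORT B =====
-- _emit_runs(urls, skip): drop the leading run equal to `skip` (the while loop = dropWhile),
-- then emit the new head and recurse on the tail.
def pvEmitRuns (urls : List (List Char)) (skip : List Char) : List String :=
  match h : urls.dropWhile (fun v => v == skip) with
  | [] => []
  | u :: us => String.mk u :: pvEmitRuns us u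
termination_by urls.length
decreasing_by
  have hle := List.length_dropWhile_le (fun v => v == skip) urls
  rw [h] at hle
  simp at hle; omega

def get_script_urls_from_call_stack_as_list_alt (call_stack : String) : List String :=
  if call_stack.toList = [] then []
  else
    let urls := (PySem.Chars.splitOn (PySem.Chars.strip call_stack.toList) ['\n']).map pvFrameUrl
    pvEmitRuns urls []

-- ===== PRECONDITION & SPEC =====
def Spec_get_script_urls_from_call_stack_as_list (call_stack : String) (out : List String) : Prop := out = get_script_urls_from_call_stack_as_list_alt call_stack
instance (call_stack : String) (out : List String) : Decidable (Spec_get_script_urls_from_call_stack_as_list call_stack out) := by unfold Spec_get_script_urls_from_call_stack_as_list; infer_instance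

-- ===== CLAIM (what is proved, stated in full; the proofs are below) =====
def Claim_equal_get_script_urls_from_call_stack_as_list : Prop := ∀ (call_stack : String), Dom_get_script_urls_from_call_stack_as_list call_stack → Spec_get_script_urls_from_call_stack_as_list call_stack (get_script_urls_from_call_stack_as_list call_stack)

-- ===== LEMMAS AND PROOFS =====

-- collapse of consecutive duplicates, pv = the previous value (characterises A's loop)
def pvCollapse (pv : List Char) : List (List Char) → List (List Char)
  | [] => []
  | u :: us => if u ≠ pv then u :: pvCollapse u us else pvCollapse pv us

theorem pvFoldA_eq (us : List (List Char)) : ∀ (last : List Char) (acc : List String),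
    (us.foldl pvStepA (last, acc)).2
      = acc ++ (pvCollapse last (us.map pvFrameUrl)).map String.mk := by
  induction us with
  | nil => intro last acc; simp [pvCollapse]
  | cons f fs ih =>
    intro last acc
    rw [List.foldl_cons]
    by_cases h : pvFrameUrl f = last
    · rw [show pvStepA (last, acc) f = (last, acc) from by simp [pvStepA, h], ih]
      simp [pvCollapse, h]
    · rw [show pvStepA (last, acc) f = (pvFrameUrl f, acc ++ [String.mk (pvFrameUrl f)]) from by
          simp [pvStepA, h], ih]
      simp [pvCollapse, h]

theorem pvCollapse_dropWhile (us : List (List Char)) : ∀ (pv : List Char),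
    pvCollapse pv us = pvCollapse pv (us.dropWhile (fun v => v == pv)) := by
  induction us with
  | nil => intro pv; rfl
  | cons u us ih =>
    intro pv
    by_cases h : u = pv
    · simp [pvCollapse, h, List.dropWhile_cons, ih]
    · simp [pvCollapse, h, List.dropWhile_cons]

theorem pvEmitRuns_eq_collapse (us : List (List Char)) (pv : List Char) :
    pvEmitRuns us pv = (pvCollapse pv us).map String.mk := by
  induction us, pv using pvEmitRuns.induct with
  | case1 us pv h =>
    rw [pvEmitRuns, h, pvCollapse_dropWhile, h]
    rfl
  | case2 us pv u us' h ih =>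
    have hne : u ≠ pv := by
      have hn : us.dropWhile (fun v => v == pv) ≠ [] := by simp [h]
      have := List.head_dropWhile_not (l := us) (fun v => v == pv) hn
      simpa [List.head_eq_iff_head?_eq_some, h] using this
    rw [pvEmitRuns, h, pvCollapse_dropWhile, h]
    simp [pvCollapse, hne, ih]

-- ===== VERDICT (by name: the statement is the Claim_ definition above) =====
theorem get_script_urls_from_call_stack_as_list_spec : Claim_equal_get_script_urls_from_call_stack_as_list := by
  intro call_stack _
  unfold Spec_get_script_urls_from_call_stack_as_list
  by_cases hemp : call_stack.toList = []
  · simp [get_script_urls_from_call_stack_as_list, get_script_urls_from_call_stack_as_list_alt, hemp]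
  · unfold get_script_urls_from_call_stack_as_list get_script_urls_from_call_stack_as_list_alt
    rw [if_neg hemp, if_neg hemp, pvEmitRuns_eq_collapse]
    simpa using pvFoldA_eq (PySem.Chars.splitOn (PySem.Chars.strip call_stack.toList) ['\n']) [] []
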